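-- pv_equiv track=rewrite | github.com/kdallen1/dither_to_embroidery | embroidery_converter.py | _find_boundary_points
-- ===== SOURCE A (Python) =====
-- from typing import Dict, List, Tuple, Optional
--
-- def _find_boundary_points(points: List[Tuple[int, int]]) -> List[Tuple[int, int]]:
--     """Find boundary points for edge underlay (simplified)"""
--     if not points:
--         return []
--     point_set = set(points)
--     boundary = []
--
--     for x, y in points:
--         # Check if point is on the boundary (has at least one non-neighbor)
--         neighbors = [(x+1, y), (x-1, y), (x, y+1), (x, y-1)]
--         if any(neighbor not in point_set for neighbor in neighbors):
--             boundary.append((x, y))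
--
--     return boundary
-- ===== SOURCE B (Python) =====
-- from typing import List, Tuple
--
-- def _find_boundary_points(points: List[Tuple[int, int]]) -> List[Tuple[int, int]]:
--     """Scatter-count: each unique point bumps a counter at its four neighbor cells;
--     a point is interior exactly when its own counter reached 4."""
--     count = {}
--     for x, y in set(points):
--         for n in ((x + 1, y), (x - 1, y), (x, y + 1), (x, y - 1)):
--             count[n] = count.get(n, 0) + 1
--     return [p for p in points if count.get(p, 0) < 4]
-- ===== Notes on version B (the rewrite author's own statement) =====
-- stated objective: alternative
-- what changed: B inverts the neighbor test into a scatter-count: one pass over the unique points increments a counter at each point's four neighbor cells, and a listed point is kept as boundary exactly when its own counter is below 4, replacing A's per-point gather of four set-membership tests.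
import Mathlib
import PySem

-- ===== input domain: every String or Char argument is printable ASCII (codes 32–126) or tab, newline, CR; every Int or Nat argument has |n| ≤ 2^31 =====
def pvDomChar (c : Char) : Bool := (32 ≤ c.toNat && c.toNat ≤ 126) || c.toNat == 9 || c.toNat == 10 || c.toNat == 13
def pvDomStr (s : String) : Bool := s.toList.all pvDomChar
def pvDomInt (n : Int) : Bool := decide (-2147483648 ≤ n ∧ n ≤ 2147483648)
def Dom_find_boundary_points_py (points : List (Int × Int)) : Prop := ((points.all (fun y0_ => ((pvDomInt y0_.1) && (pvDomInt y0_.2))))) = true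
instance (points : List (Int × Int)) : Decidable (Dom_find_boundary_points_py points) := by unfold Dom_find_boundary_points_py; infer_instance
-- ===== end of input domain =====

-- B replaces A's per-point membership tests by a scatter-count: each unique point bumps a
-- counter at its four neighbor cells, and a point is interior exactly when its own counter
-- reached 4 (objective: alternative algorithm, same asymptotic cost).

-- ===== PORT A =====
def find_boundary_points_py (points : List (Int × Int)) : List (Int × Int) :=
  if points = [] then []
  else
    let point_set : PySem.Set (Int × Int) := PySem.Set.ofList points
    points.foldl (fun boundary p =>
      let neighbors : List (Int × Int) := [(p.1+1, p.2), (p.1-1, p.2), (p.1, p.2+1), (p.1, p.2-1)]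
      if neighbors.any (fun n => !(PySem.Set.contains point_set n)) then boundary ++ [p]
      else boundary) []

-- ===== PORT B =====
-- the counting loop iterates over set(points); the counter's values are sums, hence
-- independent of the unmodelled set iteration order, and the dict is only looked up afterwards
def find_boundary_points_py_alt (points : List (Int × Int)) : List (Int × Int) :=
  let count : PySem.Dict (Int × Int) Int :=
    (PySem.Set.ofList points).foldl (fun d p =>
      [(p.1+1, p.2), (p.1-1, p.2), (p.1, p.2+1), (p.1, p.2-1)].foldl
        (fun d n => d.insert n (d.getD n 0 + 1)) d) PySem.Dict.empty
  points.filter (fun p => decide (count.getD p 0 < 4))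

-- ===== PRECONDITION & SPEC =====
def Spec_find_boundary_points_py (points : List (Int × Int)) (out : List (Int × Int)) : Prop := out = find_boundary_points_py_alt points
instance (points : List (Int × Int)) (out : List (Int × Int)) : Decidable (Spec_find_boundary_points_py points out) := by unfold Spec_find_boundary_points_py; infer_instance

-- ===== CLAIM (what is proved, stated in full; the proofs are below) =====
def Claim_equal_find_boundary_points_py : Prop := ∀ (points : List (Int × Int)), Dom_find_boundary_points_py points → Spec_find_boundary_points_py points (find_boundary_points_py points)

-- ===== LEMMAS AND PROOFS =====

def pvNb (p : Int × Int) : List (Int × Int) := [(p.1+1, p.2), (p.1-1, p.2), (p.1, p.2+1), (p.1, p.2-1)]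

theorem pv_nb_nodup (p : Int × Int) : (pvNb p).Nodup := by
  simp [pvNb, Prod.ext_iff]
  omega

theorem pv_nb_symm (p q : Int × Int) : p ∈ pvNb q ↔ q ∈ pvNb p := by
  simp [pvNb, Prod.ext_iff]
  omega

-- occurrences of p among all neighbor lists = points of L adjacent to p
theorem pv_count_nb (L : List (Int × Int)) (p : Int × Int) :
    (L.flatMap pvNb).count p = L.countP (fun q => decide (p ∈ pvNb q)) := by
  induction L with
  | nil => simp
  | cons a L ih =>
    rw [List.flatMap_cons, List.count_append, List.countP_cons, ih]
    by_cases h : p ∈ pvNb a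
    · simp [h, List.count_eq_one_of_mem (pv_nb_nodup a) h, Nat.add_comm]
    · simp [h, List.count_eq_zero_of_not_mem h]

-- for a Nodup L, counting L-elements adjacent to p = counting p's neighbors inside L
theorem pv_countP_swap (L : List (Int × Int)) (hL : L.Nodup) (p : Int × Int) :
    L.countP (fun q => decide (p ∈ pvNb q)) = (pvNb p).countP (fun n => decide (n ∈ L)) := by
  rw [List.countP_eq_length_filter, List.countP_eq_length_filter]
  apply List.Perm.length_eq
  rw [List.perm_ext_iff_of_nodup (hL.filter _) ((pv_nb_nodup p).filter _)]
  intro a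
  simp only [List.mem_filter, decide_eq_true_eq]
  constructor
  · rintro ⟨ha, hb⟩; exact ⟨(pv_nb_symm p a).1 hb, ha⟩
  · rintro ⟨ha, hb⟩; exact ⟨hb, (pv_nb_symm p a).2 ha⟩

-- B's counter at p counts the present neighbors of p
theorem pv_count_eq (points : List (Int × Int)) (p : Int × Int) :
    ((PySem.Set.ofList points).foldl (fun d q => (pvNb q).foldl
        (fun d n => d.insert n (d.getD n 0 + 1)) d) (PySem.Dict.empty : PySem.Dict (Int × Int) Int)).getD p 0
    = ((pvNb p).countP (fun n => decide (n ∈ PySem.Set.ofList points)) : Int) := by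
  rw [← List.foldl_flatMap, PySem.Dict.getD_foldl_insert_add_one, PySem.Dict.getD_empty,
    pv_count_nb, pv_countP_swap _ (PySem.Set.nodup_ofList points)]
  ring

theorem pv_cond_agree (points : List (Int × Int)) (p : Int × Int) :
    (decide ((((PySem.Set.ofList points).foldl (fun d q => (pvNb q).foldl
        (fun d n => d.insert n (d.getD n 0 + 1)) d) (PySem.Dict.empty : PySem.Dict (Int × Int) Int)).getD p 0) < 4))
    = (pvNb p).any (fun n => !(PySem.Set.contains (PySem.Set.ofList points) n)) := by
  rw [pv_count_eq]
  by_cases hall : ∀ n ∈ pvNb p, n ∈ PySem.Set.ofList points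
  · have hc : (pvNb p).countP (fun n => decide (n ∈ PySem.Set.ofList points)) = (pvNb p).length :=
      List.countP_eq_length.2 (fun a ha => by simpa using hall a ha)
    have hany : (pvNb p).any (fun n => !(PySem.Set.contains (PySem.Set.ofList points) n)) = false := by
      simp only [List.any_eq_false, Bool.not_eq_true']
      intro n hn
      rw [(PySem.Set.contains_iff _ _).2 (hall n hn)]
      simp
    rw [hc, hany, pvNb]
    simp
  · push Not at hall
    obtain ⟨n, hn, hnot⟩ := hall
    have hne : (pvNb p).countP (fun n => decide (n ∈ PySem.Set.ofList points)) ≠ (pvNb p).length := by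
      intro hcc
      exact hnot (by simpa using List.countP_eq_length.1 hcc n hn)
    have hlt : (pvNb p).countP (fun n => decide (n ∈ PySem.Set.ofList points)) < 4 :=
      lt_of_le_of_ne List.countP_le_length hne
    have hany : (pvNb p).any (fun n => !(PySem.Set.contains (PySem.Set.ofList points) n)) = true :=
      List.any_eq_true.2 ⟨n, hn, by simp [hnot]⟩
    rw [hany]
    simpa using hlt

theorem find_boundary_points_py_eq_alt (points : List (Int × Int)) :
    find_boundary_points_py points = find_boundary_points_py_alt points := by
  unfold find_boundary_points_py find_boundary_points_py_alt
  by_cases h : points = []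
  · simp [h]
  · simp only [h, if_false]
    rw [PySem.List.foldl_append_ite_eq_filter
      (p := fun p : Int × Int => ([(p.1+1, p.2), (p.1-1, p.2), (p.1, p.2+1), (p.1, p.2-1)].any
        (fun n => !(PySem.Set.contains (PySem.Set.ofList points) n))) = true)]
    rw [List.nil_append]
    apply List.filter_congr
    intro p _
    have hc := (pv_cond_agree points p).symm
    simp only [pvNb] at hc
    rw [Bool.decide_eq_true]
    exact hc

-- ===== VERDICT (by name: the statement is the Claim_ definition above) =====
theorem find_boundary_points_py_spec : Claim_equal_find_boundary_points_py := by
  intro points _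
  unfold Spec_find_boundary_points_py
  exact find_boundary_points_py_eq_alt points
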